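-- pv_equiv track=rewrite | github.com/rkm0959/CTFWriteups | 2021/DragonCTF/CRC_warmup.py | crc64
-- ===== SOURCE A (Python) =====
-- def crc64(buf, crc=0xffffffffffffffff):
--     for val in buf:
--         crc ^= val << 56
--         for _ in range(8):
--             crc <<= 1
--             if crc & 2**64:
--                 crc ^= 0x1ad93d23594c935a9
--     return crc
-- ===== SOURCE B (Python) =====
-- # Table-driven CRC-64: precompute the 8-round transform for each top-byte value
-- # once, then process each input byte with one table lookup + shift instead of the
-- # 8-iteration inner loop.
-- def _make_table():
--     table = []
--     for i in range(256):
--         e = i << 56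
--         for _ in range(8):
--             e <<= 1
--             if e & 2**64:
--                 e ^= 0x1ad93d23594c935a9
--         table.append(e)
--     return table
--
-- _TABLE = _make_table()
--
-- def crc64(buf, crc=0xffffffffffffffff):
--     for val in buf:
--         u = crc ^ (val << 56)
--         t = (u >> 56) & 0xff
--         crc = ((u ^ (t << 56)) << 8) ^ _TABLE[t]
--     return crc
-- ===== Notes on version B (the rewrite author's own statement) =====
-- stated objective: alternative
-- what changed: B precomputes a 256-entry table of the 8-round shift/XOR transform for every top-byte value (once, at import), so the per-byte hot loop becomes a single table lookup plus shift/XOR instead of A's inner 8-iteration loop.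
import Mathlib
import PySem

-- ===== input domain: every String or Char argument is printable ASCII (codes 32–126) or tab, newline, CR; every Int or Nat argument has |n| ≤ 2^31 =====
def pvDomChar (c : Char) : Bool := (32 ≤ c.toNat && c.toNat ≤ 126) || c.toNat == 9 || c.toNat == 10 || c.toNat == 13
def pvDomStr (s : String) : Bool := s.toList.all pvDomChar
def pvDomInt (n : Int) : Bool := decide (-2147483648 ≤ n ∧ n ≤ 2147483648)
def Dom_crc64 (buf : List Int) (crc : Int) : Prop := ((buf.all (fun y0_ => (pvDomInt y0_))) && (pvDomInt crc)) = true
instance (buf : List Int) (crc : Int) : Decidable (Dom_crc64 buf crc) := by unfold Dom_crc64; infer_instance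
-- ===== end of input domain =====

-- B replaces A's per-byte 8-round shift/XOR inner loop by a 256-entry table precomputed
-- once, so the hot loop does a single lookup per byte (same results on every input).

-- ===== PORT A =====
-- literal transliteration of A: for each val, fold the 8-round shift/XOR loop
def crc64 (buf : List Int) (crc : Int) : Int :=
  buf.foldl
    (fun (crc val : Int) =>
      (List.range 8).foldl
        (fun crc _ =>
          let crc := crc <<< (1 : Nat)
          if Int.land crc (2 ^ 64) ≠ 0 then Int.xor crc 0x1ad93d23594c935a9 else crc)
        (Int.xor crc (val <<< (56 : Nat))))
    crc

-- ===== PORT B =====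
-- _TABLE of Source B: the 8-round transform of each byte value shifted into the top byte
def crcTable : List Int :=
  (List.range 256).foldl
    (fun (table : List Int) (i : ℕ) =>
      table ++
        [(List.range 8).foldl
          (fun (e : Int) _ =>
            let e := e <<< (1 : Nat)
            if Int.land e (2 ^ 64) ≠ 0 then Int.xor e 0x1ad93d23594c935a9 else e)
          ((i : Int) <<< (56 : Nat))])
    []

-- hot loop of Source B: one table lookup per byte.  `_TABLE[t]` is ported as
-- pyGet? + getD: t = (u >> 56) & 0xff always lies in [0, 256), so the lookup
-- never misses and the default is never used (exact).
def crc64_alt (buf : List Int) (crc : Int) : Int :=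
  buf.foldl
    (fun (c val : Int) =>
      let u := Int.xor c (val <<< (56 : Nat))
      let t := Int.land (u >>> (56 : Nat)) 255
      Int.xor ((Int.xor u (t <<< (56 : Nat))) <<< (8 : Nat))
        ((PySem.List.pyGet? crcTable t).getD 0))
    crc

-- ===== PRECONDITION & SPEC =====
def Spec_crc64 (buf : List Int) (crc : Int) (out : Int) : Prop := out = crc64_alt buf crc
instance (buf : List Int) (crc : Int) (out : Int) : Decidable (Spec_crc64 buf crc out) := by unfold Spec_crc64; infer_instance

-- ===== CLAIM (what is proved, stated in full; the proofs are below) =====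
def Claim_equal_crc64 : Prop := ∀ (buf : List Int) (crc : Int), Dom_crc64 buf crc → Spec_crc64 buf crc (crc64 buf crc)

-- ===== LEMMAS AND PROOFS =====

-- the single CRC round (shared body of both ports' inner 8-iteration loops)
def pvRound (c : Int) : Int :=
  let c := c <<< (1 : Nat)
  if Int.land c (2 ^ 64) ≠ 0 then Int.xor c 0x1ad93d23594c935a9 else c

-- fold of a constant-function body over `range n` is iteration
theorem pv_foldl_range_const (f : Int → Int) (n : ℕ) (c : Int) :
    (List.range n).foldl (fun a _ => f a) c = f^[n] c := by
  induction n generalizing c with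
  | zero => simp
  | succ n ih =>
      rw [List.range_succ, List.foldl_append, ih, Function.iterate_succ_apply']
      simp

-- ---- Int.testBit toolkit ----

theorem pv_nat_tb_big (m n : ℕ) : m.testBit (m + n + 1) = false := by
  apply Nat.testBit_lt_two_pow
  calc m < 2 ^ m := Nat.lt_two_pow_self
    _ ≤ 2 ^ (m + n + 1) := Nat.pow_le_pow_right (by norm_num) (by omega)

theorem pv_tb_ext {x y : Int} (h : ∀ k, x.testBit k = y.testBit k) : x = y := by
  cases x with
  | ofNat m =>
      cases y with
      | ofNat n =>
          have hmn : m = n := Nat.eq_of_testBit_eq fun i => h i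
          rw [hmn]
      | negSucc n =>
          exfalso
          have hk := h (m + n + 1)
          have hm : m.testBit (m + n + 1) = false := pv_nat_tb_big m n
          have hn : n.testBit (m + n + 1) = false := by
            have := pv_nat_tb_big n m
            rwa [show n + m + 1 = m + n + 1 by omega] at this
          rw [show (Int.ofNat m).testBit (m + n + 1) = m.testBit (m + n + 1) from rfl,
              show (Int.negSucc n).testBit (m + n + 1) = !n.testBit (m + n + 1) from rfl,
              hm, hn] at hk
          exact Bool.noConfusion hk
  | negSucc m =>
      cases y with
      | ofNat n =>
          exfalso
          have hk := h (m + n + 1)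
          have hm : m.testBit (m + n + 1) = false := pv_nat_tb_big m n
          have hn : n.testBit (m + n + 1) = false := by
            have := pv_nat_tb_big n m
            rwa [show n + m + 1 = m + n + 1 by omega] at this
          rw [show (Int.negSucc m).testBit (m + n + 1) = !m.testBit (m + n + 1) from rfl,
              show (Int.ofNat n).testBit (m + n + 1) = n.testBit (m + n + 1) from rfl,
              hm, hn] at hk
          exact Bool.noConfusion hk
      | negSucc n =>
          have hmn : m = n := Nat.eq_of_testBit_eq fun i => by
            have hi := h i
            rw [show (Int.negSucc m).testBit i = !m.testBit i from rfl,
                show (Int.negSucc n).testBit i = !n.testBit i from rfl] at hi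
            exact Bool.not_inj hi
          rw [hmn]

theorem pv_tb_shl (x : Int) (s k : ℕ) :
    (x <<< s).testBit k = (decide (s ≤ k) && x.testBit (k - s)) := by
  cases x with
  | ofNat m =>
      show (Int.ofNat (m <<< s)).testBit k = _
      simp [Int.testBit, Nat.testBit_shiftLeft, ge_iff_le]
  | negSucc m =>
      show (Int.negSucc ((m + 1) <<< s - 1)).testBit k = _
      have hrw : (m + 1) <<< s - 1 = 2 ^ s * m + (2 ^ s - 1) := by
        have h1 : (m + 1) <<< s = (m + 1) * 2 ^ s := Nat.shiftLeft_eq _ _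
        have h2 : 1 ≤ 2 ^ s := Nat.one_le_two_pow
        rw [h1]; ring_nf; omega
      have hb : 2 ^ s - 1 < 2 ^ s := by have := Nat.one_le_two_pow (n := s); omega
      simp only [Int.testBit, hrw, Nat.testBit_two_pow_mul_add _ hb]
      by_cases hks : k < s
      · rw [if_pos hks]
        simp [Nat.testBit_two_pow_sub_one, hks, show ¬ s ≤ k by omega]
      · rw [if_neg hks]
        simp [show s ≤ k by omega]

theorem pv_tb_shr (x : Int) (s k : ℕ) :
    (x >>> s).testBit k = x.testBit (k + s) := by
  cases x with
  | ofNat m =>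
      show (Int.ofNat (m >>> s)).testBit k = _
      simp [Int.testBit, Nat.testBit_shiftRight, Nat.add_comm]
  | negSucc m =>
      show (Int.negSucc (m >>> s)).testBit k = _
      simp [Int.testBit, Nat.testBit_shiftRight, Nat.add_comm]

theorem pv_tb_255 (k : ℕ) : (255 : Int).testBit k = decide (k < 8) := by
  show Nat.testBit 255 k = _
  rw [show (255 : ℕ) = 2 ^ 8 - 1 by norm_num]
  exact Nat.testBit_two_pow_sub_one 8 k

theorem pv_tb_zero (k : ℕ) : (0 : Int).testBit k = false := by
  show Nat.testBit 0 k = false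
  simp

theorem pv_tb_two_pow_64 (k : ℕ) : (2 ^ 64 : Int).testBit k = decide (64 = k) := by
  have h : (2 ^ 64 : Int) = ((2 ^ 64 : ℕ) : Int) := by norm_cast
  rw [h]
  show Nat.testBit (2 ^ 64) k = _
  exact Nat.testBit_two_pow

theorem pv_tb_big (k : ℕ) : (18446744073709551616 : Int).testBit k = decide (64 = k) := by
  have h : (18446744073709551616 : Int) = (2 ^ 64 : Int) := by norm_num
  rw [h]
  exact pv_tb_two_pow_64 k

theorem pv_land_two_pow (c : Int) : Int.land c (2 ^ 64) ≠ 0 ↔ c.testBit 64 := by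
  have hland : Int.land c (2 ^ 64) = if c.testBit 64 then (2 ^ 64 : Int) else 0 := by
    apply pv_tb_ext
    intro k
    rw [Int.testBit_land, pv_tb_two_pow_64]
    by_cases hk : (64 : ℕ) = k
    · subst hk
      cases h : c.testBit 64 <;> simp [h, pv_tb_big, pv_tb_zero]
    · cases h : c.testBit 64 <;> simp [hk, pv_tb_big, pv_tb_zero]
  rw [hland]
  cases h : c.testBit 64 <;> simp <;> norm_num

-- xor algebra on Int, by bit extensionality
theorem pv_xor_shl (x y : Int) (s : ℕ) :
    (Int.xor x y) <<< s = Int.xor (x <<< s) (y <<< s) := by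
  apply pv_tb_ext; intro k
  simp only [Int.testBit_lxor, pv_tb_shl]
  cases h : decide (s ≤ k) <;> simp [h]

theorem pv_xor_cancel (u v : Int) : Int.xor (Int.xor u v) v = u := by
  apply pv_tb_ext; intro k
  simp [Int.testBit_lxor]

theorem pv_xor4 (a b p : Int) :
    Int.xor (Int.xor a p) (Int.xor b p) = Int.xor a b := by
  apply pv_tb_ext; intro k
  simp only [Int.testBit_lxor]
  cases ha : a.testBit k <;> cases hb : b.testBit k <;> cases hp : p.testBit k <;> simp

theorem pv_xorA (a b p : Int) :
    Int.xor (Int.xor a b) p = Int.xor (Int.xor a p) b := by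
  apply pv_tb_ext; intro k
  simp only [Int.testBit_lxor]
  cases ha : a.testBit k <;> cases hb : b.testBit k <;> cases hp : p.testBit k <;> simp

theorem pv_xorB (a b p : Int) :
    Int.xor (Int.xor a b) p = Int.xor a (Int.xor b p) := by
  apply pv_tb_ext; intro k
  simp only [Int.testBit_lxor]
  cases ha : a.testBit k <;> cases hb : b.testBit k <;> cases hp : p.testBit k <;> simp

-- one CRC round is GF(2)-linear
theorem pv_round_linear (x y : Int) :
    pvRound (Int.xor x y) = Int.xor (pvRound x) (pvRound y) := by
  have hcond : ∀ z : Int, (Int.land (z <<< (1 : Nat)) (2 ^ 64) ≠ 0) ↔ z.testBit 63 := by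
    intro z
    rw [pv_land_two_pow, pv_tb_shl]
    norm_num
  have hform : ∀ z : Int, pvRound z =
      if z.testBit 63 then Int.xor (z <<< (1 : Nat)) 0x1ad93d23594c935a9
      else z <<< (1 : Nat) := by
    intro z
    unfold pvRound
    by_cases h : z.testBit 63
    · rw [if_pos ((hcond z).mpr h), if_pos h]
    · rw [if_neg (fun hc => h ((hcond z).mp hc)), if_neg h]
  rw [hform, hform, hform, Int.testBit_lxor]
  cases hx : x.testBit 63 <;> cases hy : y.testBit 63 <;>
    simp only [hx, hy, Bool.xor_false, Bool.xor_true, Bool.false_eq_true, ite_true,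
      ite_false]
  · exact pv_xor_shl x y 1
  · rw [pv_xor_shl]
    exact pv_xorB _ _ _
  · rw [pv_xor_shl]
    exact pv_xorA _ _ _
  · rw [pv_xor_shl]
    exact (pv_xor4 _ _ _).symm

theorem pv_iter_linear (n : ℕ) (x y : Int) :
    pvRound^[n] (Int.xor x y) = Int.xor (pvRound^[n] x) (pvRound^[n] y) := by
  induction n generalizing x y with
  | zero => simp
  | succ n ih => simp [Function.iterate_succ_apply, pv_round_linear, ih]

theorem pv_shl_shl (x : Int) (a b : ℕ) : (x <<< a) <<< b = x <<< (a + b) := by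
  simp [Int.shiftLeft_eq, pow_add, mul_assoc]

-- rounds without feedback: if bits 64-n .. 63 are clear, n rounds are a plain shift
theorem pv_iter_no_red : ∀ (n : ℕ), n ≤ 8 →
    ∀ c : Int, (∀ j, 64 - n ≤ j → j < 64 → c.testBit j = false) →
      pvRound^[n] c = c <<< n := by
  intro n
  induction n with
  | zero => intro _ c _; simp [Int.shiftLeft_eq]
  | succ n ih =>
      intro hn c hc
      have h63 : c.testBit 63 = false := hc 63 (by omega) (by omega)
      have hstep : pvRound c = c <<< (1 : Nat) := by
        unfold pvRound
        rw [if_neg]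
        intro h
        rw [pv_land_two_pow, pv_tb_shl] at h
        norm_num at h
        simp [h63] at h
      rw [Function.iterate_succ_apply, hstep,
        ih (by omega) _ (fun j h1 h2 => by
          rw [pv_tb_shl]
          by_cases h1j : (1 : ℕ) ≤ j
          · simp [h1j, hc (j - 1) (by omega) (by omega)]
          · exact absurd (by omega : (1 : ℕ) ≤ j) h1j),
        pv_shl_shl, Nat.add_comm 1 n]

-- the table really is the list of the 8-round images of the 256 top-byte values
theorem pv_foldl_append_map {α β : Type} (f : α → β) (l : List α) (acc : List β) :
    l.foldl (fun a x => a ++ [f x]) acc = acc ++ l.map f := by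
  induction l generalizing acc with
  | nil => simp
  | cons x xs ih => simp [List.foldl_cons, ih]

theorem pv_inner8 (c : Int) :
    (List.range 8).foldl
      (fun (e : Int) _ =>
        let e := e <<< (1 : Nat)
        if Int.land e (2 ^ 64) ≠ 0 then Int.xor e 0x1ad93d23594c935a9 else e)
      c = pvRound^[8] c :=
  pv_foldl_range_const pvRound 8 c

theorem pv_table_eq :
    crcTable = (List.range 256).map
      (fun i : ℕ => pvRound^[8] (((i : ℕ) : Int) <<< (56 : Nat))) := by
  unfold crcTable
  simp only [pv_inner8]
  rw [pv_foldl_append_map (fun i : ℕ => pvRound^[8] (((i : ℕ) : Int) <<< (56 : Nat)))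
    (List.range 256) []]
  simp

-- facts about t = (u >> 56) & 0xff
theorem pv_t_nonneg (x : Int) : 0 ≤ Int.land x 255 := by
  cases x with
  | ofNat m => exact Int.natCast_nonneg _
  | negSucc m => exact Int.natCast_nonneg _

theorem pv_t_lt (x : Int) : Int.land x 255 < 256 := by
  cases x with
  | ofNat m =>
      show (Int.ofNat (m &&& 255)) < 256
      have h : m &&& 255 < 256 := Nat.lt_succ_of_le Nat.and_le_right
      rw [Int.ofNat_eq_natCast]
      exact_mod_cast h
  | negSucc m =>
      show (Int.ofNat (Nat.ldiff 255 m)) < 256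
      have h : Nat.ldiff 255 m < 2 ^ 8 := by
        apply Nat.lt_pow_two_of_testBit
        intro i hi
        rw [Nat.testBit_ldiff, show (255 : ℕ) = 2 ^ 8 - 1 by norm_num,
          Nat.testBit_two_pow_sub_one]
        simp [show ¬ i < 8 by omega]
      rw [Int.ofNat_eq_natCast]
      exact_mod_cast h

theorem pv_tb_t (x : Int) (k : ℕ) :
    (Int.land x 255).testBit k = (x.testBit k && decide (k < 8)) := by
  rw [Int.testBit_land, pv_tb_255]

-- the per-byte step of B, written out (the lets of crc64_alt zeta-reduced)
def pvStepB (c val : Int) : Int :=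
  Int.xor
    ((Int.xor (Int.xor c (val <<< (56 : Nat)))
        ((Int.land ((Int.xor c (val <<< (56 : Nat))) >>> (56 : Nat)) 255) <<< (56 : Nat))) <<<
      (8 : Nat))
    ((PySem.List.pyGet? crcTable
        (Int.land ((Int.xor c (val <<< (56 : Nat))) >>> (56 : Nat)) 255)).getD 0)

-- the per-byte step of A equals the per-byte table step of B
theorem pv_step (c v : Int) :
    pvRound^[8] (Int.xor c (v <<< (56 : Nat))) = pvStepB c v := by
  unfold pvStepB
  set u := Int.xor c (v <<< (56 : Nat)) with hu_def
  set t := Int.land (u >>> (56 : Nat)) 255 with ht_def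
  set r := Int.xor u (t <<< (56 : Nat)) with hr_def
  -- bits 56..63 of r are clear
  have hrbits : ∀ j, 56 ≤ j → j < 64 → r.testBit j = false := by
    intro j h1 h2
    have htj : t.testBit (j - 56) = u.testBit j := by
      rw [ht_def, pv_tb_t, pv_tb_shr]
      have e1 : j - 56 + 56 = j := by omega
      simp [e1, show j - 56 < 8 by omega]
    rw [hr_def]
    rw [Int.testBit_lxor, pv_tb_shl, htj]
    simp [show 56 ≤ j by omega]
  -- u = r ^ (t << 56)
  have hu : u = Int.xor r (t <<< (56 : Nat)) := by
    rw [hr_def, pv_xor_cancel]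
  -- split off the table part
  have h1 : pvRound^[8] u = Int.xor (pvRound^[8] r) (pvRound^[8] (t <<< (56 : Nat))) := by
    rw [hu, pv_iter_linear]
  -- non-feedback part is a plain shift
  have h2 : pvRound^[8] r = r <<< (8 : Nat) :=
    pv_iter_no_red 8 (le_refl _) r (fun j ha hb => hrbits j (by omega) hb)
  -- table lookup
  have ht0 : 0 ≤ t := pv_t_nonneg _
  have ht256 : t.toNat < 256 := by
    have := pv_t_lt (u >>> (56 : Nat))
    omega
  have h3 : (PySem.List.pyGet? crcTable t).getD 0 = pvRound^[8] (t <<< (56 : Nat)) := by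
    rw [pv_table_eq, show t = ((t.toNat : ℕ) : Int) by omega,
      PySem.List.pyGet?_natCast, List.getElem?_map, List.getElem?_range ht256]
    simp
  rw [h1, h2, h3]

-- foldl over pointwise-equal step functions
theorem pv_foldl_ext {f g : Int → Int → Int} (h : ∀ a b, f a b = g a b) :
    ∀ (l : List Int) (c : Int), l.foldl f c = l.foldl g c := by
  intro l
  induction l with
  | nil => intro c; rfl
  | cons x xs ih =>
      intro c
      simp only [List.foldl_cons, h]
      exact ih _

-- ===== VERDICT (by name: the statement is the Claim_ definition above) =====
theorem crc64_spec : Claim_equal_crc64 := by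
  intro buf crc _
  show crc64 buf crc = crc64_alt buf crc
  have hA : crc64 buf crc =
      buf.foldl (fun (c val : Int) => pvRound^[8] (Int.xor c (val <<< (56 : Nat)))) crc := by
    unfold crc64
    exact pv_foldl_ext (fun a b => pv_inner8 _) buf crc
  have hB : crc64_alt buf crc = buf.foldl pvStepB crc := rfl
  rw [hA, hB]
  exact pv_foldl_ext (fun a b => pv_step a b) buf crc
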